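-- pv_equiv track=rewrite | github.com/RaniaSaoud/THJ_project | Pareto-Dominant-Strategy.py | find_pareto_dominant_strategies
-- ===== SOURCE A (Python) =====
-- def find_pareto_dominant_strategies(method_accuracies):
--     pareto_dominant_strategies = []
--     for strategy, accuracy in method_accuracies.items():
--         is_dominated = False
--         for other_strategy, other_accuracy in method_accuracies.items():
--             if strategy != other_strategy and other_accuracy >= accuracy:
--                 is_dominated = True
--                 break
--         if not is_dominated:
--             pareto_dominant_strategies.append(strategy)
--     return pareto_dominant_strategies
-- ===== SOURCE B (Python) =====
-- def find_pareto_dominant_strategies(method_accuracies):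
--     # One pass: track the running maximum accuracy, the key of the entry that set
--     # it, and how many entries attain it; answer is that key iff the max is unique.
--     best_key = None
--     best_acc = None
--     count = 0
--     for strategy, accuracy in method_accuracies.items():
--         if best_acc is None or accuracy > best_acc:
--             best_key, best_acc, count = strategy, accuracy, 1
--         elif accuracy == best_acc:
--             count += 1
--     return [best_key] if count == 1 else []
-- ===== Notes on version B (the rewrite author's own statement) =====
-- stated objective: alternative
-- what changed: Replaces A's nested scan (for each strategy, rescan all items to test domination) with a single pass that tracks the running maximum accuracy, the strategy that set it, and how many entries attain it, returning that strategy iff the count is 1.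
import Mathlib
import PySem

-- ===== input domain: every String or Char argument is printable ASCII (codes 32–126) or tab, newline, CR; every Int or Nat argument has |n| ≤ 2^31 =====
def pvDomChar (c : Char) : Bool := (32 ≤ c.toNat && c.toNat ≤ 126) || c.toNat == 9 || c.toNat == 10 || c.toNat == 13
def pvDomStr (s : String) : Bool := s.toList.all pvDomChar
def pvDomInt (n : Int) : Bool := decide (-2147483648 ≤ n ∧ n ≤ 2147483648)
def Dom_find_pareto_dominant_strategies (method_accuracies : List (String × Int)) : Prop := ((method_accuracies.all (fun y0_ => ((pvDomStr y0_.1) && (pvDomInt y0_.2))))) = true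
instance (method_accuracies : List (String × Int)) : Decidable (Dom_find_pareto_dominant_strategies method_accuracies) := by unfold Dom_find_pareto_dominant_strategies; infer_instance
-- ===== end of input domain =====

-- B replaces A's nested domination rescan by one linear pass tracking the running
-- maximum accuracy, its strategy and its multiplicity (objective: alternative single-pass algorithm).

-- ===== PORT A =====
-- The dict parameter arrives as an association list; .items() iterates the dict's
-- entries, i.e. (PySem.Dict.ofList ...).items.
def find_pareto_dominant_strategies (method_accuracies : List (String × Int)) : List String :=
  let items := (PySem.Dict.ofList method_accuracies).items
  items.foldl (fun acc p =>
    -- inner loop with break: is_dominated ends up true iff some other entry matches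
    let is_dominated := items.any (fun q => (p.1 != q.1) && decide (q.2 ≥ p.2))
    if is_dominated then acc else acc ++ [p.1]) []

-- ===== PORT B =====
-- loop state: None (no entry seen yet) | (best_key, best_acc, count)
def pvBestStep (st : Option (String × Int × Int)) (p : String × Int) : Option (String × Int × Int) :=
  match st with
  | none => some (p.1, p.2, 1)
  | some (k, m, c) =>
    if p.2 > m then some (p.1, p.2, 1)
    else if p.2 = m then some (k, m, c + 1)
    else some (k, m, c)

def find_pareto_dominant_strategies_alt (method_accuracies : List (String × Int)) : List String :=
  match (PySem.Dict.ofList method_accuracies).items.foldl pvBestStep none with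
  | none => []                                      -- count == 0
  | some (k, _, c) => if c = 1 then [k] else []     -- [best_key] if count == 1 else []

-- ===== PRECONDITION & SPEC =====
def Spec_find_pareto_dominant_strategies (method_accuracies : List (String × Int)) (out : List String) : Prop :=
  out = find_pareto_dominant_strategies_alt method_accuracies
instance (method_accuracies : List (String × Int)) (out : List String) : Decidable (Spec_find_pareto_dominant_strategies method_accuracies out) := by
  unfold Spec_find_pareto_dominant_strategies; infer_instance

-- ===== CLAIM =====
def Claim_equal_find_pareto_dominant_strategies : Prop :=
  ∀ (method_accuracies : List (String × Int)), Dom_find_pareto_dominant_strategies method_accuracies →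
    Spec_find_pareto_dominant_strategies method_accuracies (find_pareto_dominant_strategies method_accuracies)

-- ===== LEMMAS AND PROOFS =====

-- the per-entry predicate A keeps: no OTHER entry of xs has accuracy ≥ p's
def pvKeep (xs : List (String × Int)) (p : String × Int) : Bool :=
  ! xs.any (fun q => (p.1 != q.1) && decide (q.2 ≥ p.2))

-- A's fold over a fixed scan list ys, written as a filter.
theorem a_fold_eq_filter (ys xs : List (String × Int)) (acc : List String) :
    xs.foldl (fun acc p =>
      let is_dominated := ys.any (fun q => (p.1 != q.1) && decide (q.2 ≥ p.2))
      if is_dominated then acc else acc ++ [p.1]) acc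
    = acc ++ (xs.filter (pvKeep ys)).map Prod.fst := by
  have hfun : (fun (acc : List String) (p : String × Int) =>
      let is_dominated := ys.any (fun q => (p.1 != q.1) && decide (q.2 ≥ p.2))
      if is_dominated then acc else acc ++ [p.1])
    = (fun acc p => if pvKeep ys p then acc ++ [p.1] else acc) := by
    funext a p
    simp only [pvKeep]
    by_cases h : (ys.any (fun q => (p.1 != q.1) && decide (q.2 ≥ p.2))) = true <;> simp [h]
  rw [hfun]
  exact PySem.List.foldl_append_if (pvKeep ys) Prod.fst xs acc

-- B's fold invariant, generalized over the running state.
theorem b_fold_go (xs : List (String × Int)) :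
    ∀ (k : String) (m c : Int),
    ∃ k' m' c', xs.foldl pvBestStep (some (k, m, c)) = some (k', m', c') ∧
      m ≤ m' ∧ ((k', m') ∈ xs ∨ (k' = k ∧ m' = m)) ∧ (∀ p ∈ xs, p.2 ≤ m') ∧
      c' = (if m' = m then c else 0) + (xs.countP (fun p => decide (p.2 = m')) : Int) := by
  induction xs with
  | nil => intro k m c; exact ⟨k, m, c, rfl, le_refl _, Or.inr ⟨rfl, rfl⟩, by simp, by simp⟩
  | cons x t ih =>
    intro k m c
    by_cases hgt : x.2 > m
    · obtain ⟨k', m', c', heq, hle, hmem, hall, hc⟩ := ih x.1 x.2 1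
      refine ⟨k', m', c', ?_, le_of_lt (lt_of_lt_of_le hgt hle), ?_, ?_, ?_⟩
      · simp only [List.foldl_cons, pvBestStep, if_pos hgt]; exact heq
      · rcases hmem with h | ⟨hk, hm⟩
        · exact Or.inl (List.mem_cons_of_mem _ h)
        · subst hk; subst hm; exact Or.inl (List.mem_cons_self)
      · intro p hp
        rcases List.mem_cons.mp hp with rfl | hp
        · exact hle
        · exact hall p hp
      · rw [List.countP_cons]
        simp only [decide_eq_true_eq]
        split_ifs at hc ⊢ <;> omega
    · by_cases heqm : x.2 = m
      · obtain ⟨k', m', c', heq, hle, hmem, hall, hc⟩ := ih k m (c + 1)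
        refine ⟨k', m', c', ?_, hle, ?_, ?_, ?_⟩
        · simp only [List.foldl_cons, pvBestStep, if_neg hgt, if_pos heqm]; exact heq
        · rcases hmem with h | h
          · exact Or.inl (List.mem_cons_of_mem _ h)
          · exact Or.inr h
        · intro p hp
          rcases List.mem_cons.mp hp with rfl | hp
          · omega
          · exact hall p hp
        · rw [List.countP_cons]
          simp only [decide_eq_true_eq]
          split_ifs at hc ⊢ <;> omega
      · obtain ⟨k', m', c', heq, hle, hmem, hall, hc⟩ := ih k m c
        refine ⟨k', m', c', ?_, hle, ?_, ?_, ?_⟩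
        · simp only [List.foldl_cons, pvBestStep, if_neg hgt, if_neg heqm]; exact heq
        · rcases hmem with h | h
          · exact Or.inl (List.mem_cons_of_mem _ h)
          · exact Or.inr h
        · intro p hp
          rcases List.mem_cons.mp hp with rfl | hp
          · omega
          · exact hall p hp
        · rw [List.countP_cons]
          simp only [decide_eq_true_eq]
          split_ifs at hc ⊢ <;> omega

-- B's fold on a nonempty list: state = max, a witness entry, the multiplicity.
theorem b_fold_spec (xs : List (String × Int)) (hne : xs ≠ []) :
    ∃ k m c, xs.foldl pvBestStep none = some (k, m, c) ∧
      (k, m) ∈ xs ∧ (∀ p ∈ xs, p.2 ≤ m) ∧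
      c = (xs.countP (fun p => decide (p.2 = m)) : Int) := by
  cases xs with
  | nil => exact absurd rfl hne
  | cons x t =>
    obtain ⟨k', m', c', heq, hle, hmem, hall, hc⟩ := b_fold_go t x.1 x.2 1
    refine ⟨k', m', c', ?_, ?_, ?_, ?_⟩
    · simpa only [List.foldl_cons, pvBestStep] using heq
    · rcases hmem with h | ⟨hk, hm⟩
      · exact List.mem_cons_of_mem _ h
      · subst hk; subst hm; exact List.mem_cons_self
    · intro p hp
      rcases List.mem_cons.mp hp with rfl | hp
      · exact hle
      · exact hall p hp
    · rw [List.countP_cons]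
      simp only [decide_eq_true_eq]
      split_ifs at hc ⊢ <;> omega

-- keys of xs injective on members
theorem key_inj (xs : List (String × Int)) (hnd : (xs.map Prod.fst).Nodup)
    {p q : String × Int} (hp : p ∈ xs) (hq : q ∈ xs) (h : p.1 = q.1) : p = q :=
  List.inj_on_of_nodup_map hnd hp hq h

-- unique strict max: A keeps exactly the max entry
theorem filter_keep_unique (xs : List (String × Int)) (hnd : (xs.map Prod.fst).Nodup)
    (k : String) (m : Int) (hmem : (k, m) ∈ xs) (hall : ∀ p ∈ xs, p.2 ≤ m)
    (hcnt : xs.countP (fun p => decide (p.2 = m)) = 1) :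
    (xs.filter (pvKeep xs)).map Prod.fst = [k] := by
  have hxs : xs.Nodup := hnd.of_map
  have hfil : xs.filter (fun p => decide (p.2 = m)) = [(k, m)] := by
    have hlen : (xs.filter (fun p => decide (p.2 = m))).length = 1 := by
      rw [← List.countP_eq_length_filter]; exact hcnt
    obtain ⟨a, ha⟩ := List.length_eq_one_iff.mp hlen
    have : (k, m) ∈ xs.filter (fun p => decide (p.2 = m)) :=
      List.mem_filter.mpr ⟨hmem, by simp⟩
    rw [ha] at this
    simp at this
    rw [ha, this]
  have huniq : ∀ q ∈ xs, q.2 = m → q = (k, m) := by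
    intro q hq hqm
    have : q ∈ xs.filter (fun p => decide (p.2 = m)) :=
      List.mem_filter.mpr ⟨hq, by simp [hqm]⟩
    rw [hfil] at this; simpa using this
  have hcong : xs.filter (pvKeep xs) = xs.filter (fun p => p == (k, m)) := by
    apply List.filter_congr
    intro p hp
    by_cases hpk : p = (k, m)
    · subst hpk
      simp only [pvKeep, beq_self_eq_true]
      rw [Bool.not_eq_true', List.any_eq_false]
      intro q hq
      simp only [Bool.and_eq_true, bne_iff_ne, ne_eq, decide_eq_true_eq, ge_iff_le, not_and, not_le]
      intro hkq
      by_cases hqm : q.2 = m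
      · exact absurd (congrArg Prod.fst (huniq q hq hqm)).symm hkq
      · exact lt_of_le_of_ne (hall q hq) hqm
    · have hbeq : (p == (k, m)) = false := by simpa using hpk
      rw [hbeq]
      simp only [pvKeep, Bool.not_eq_false']
      rw [List.any_eq_true]
      refine ⟨(k, m), hmem, ?_⟩
      have hp1 : p.1 ≠ k := fun h => hpk (key_inj xs hnd hp hmem h)
      simp [hp1, hall p hp]
  rw [hcong]
  rw [List.filter_beq, List.count_eq_one_of_mem hxs hmem]
  simp
-- tied max: A keeps nothing
theorem filter_keep_tied (xs : List (String × Int)) (hnd : (xs.map Prod.fst).Nodup)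
    (m : Int) (hall : ∀ p ∈ xs, p.2 ≤ m)
    (hcnt : 2 ≤ xs.countP (fun p => decide (p.2 = m))) :
    (xs.filter (pvKeep xs)).map Prod.fst = [] := by
  have hxs : xs.Nodup := hnd.of_map
  have hlen : 2 ≤ (xs.filter (fun p => decide (p.2 = m))).length := by
    rw [← List.countP_eq_length_filter]; exact hcnt
  obtain ⟨a, b, t, hft⟩ : ∃ a b t, xs.filter (fun p => decide (p.2 = m)) = a :: b :: t := by
    cases hft : xs.filter (fun p => decide (p.2 = m)) with
    | nil => rw [hft] at hlen; simp at hlen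
    | cons a t1 =>
      cases t1 with
      | nil => rw [hft] at hlen; simp at hlen
      | cons b t2 => exact ⟨a, b, t2, rfl⟩
  have hfnd : (xs.filter (fun p => decide (p.2 = m))).Nodup := hxs.filter _
  rw [hft] at hfnd
  have hab : a ≠ b := by
    intro h; rw [h] at hfnd; simp at hfnd
  have ham : a ∈ xs ∧ a.2 = m := by
    have : a ∈ xs.filter (fun p => decide (p.2 = m)) := by rw [hft]; simp
    have h2 := List.mem_filter.mp this; exact ⟨h2.1, by simpa using h2.2⟩
  have hbm : b ∈ xs ∧ b.2 = m := by
    have : b ∈ xs.filter (fun p => decide (p.2 = m)) := by rw [hft]; simp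
    have h2 := List.mem_filter.mp this; exact ⟨h2.1, by simpa using h2.2⟩
  have hfe : xs.filter (pvKeep xs) = [] := by
    rw [List.filter_eq_nil_iff]
    intro p hp
    simp only [pvKeep, Bool.not_eq_true, Bool.not_eq_false']
    rw [List.any_eq_true]
    by_cases hpa : p.1 = a.1
    · refine ⟨b, hbm.1, ?_⟩
      have hpb : p.1 ≠ b.1 := by
        intro h
        exact hab (key_inj xs hnd ham.1 hbm.1 (hpa.symm.trans h))
      simp [hpb, hbm.2 ▸ hall p hp]
    · refine ⟨a, ham.1, ?_⟩
      simp [hpa, ham.2 ▸ hall p hp]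
  rw [hfe]; rfl

theorem main_eq (xs : List (String × Int)) (hnd : (xs.map Prod.fst).Nodup) :
    xs.foldl (fun acc p =>
      let is_dominated := xs.any (fun q => (p.1 != q.1) && decide (q.2 ≥ p.2))
      if is_dominated then acc else acc ++ [p.1]) []
    = (match xs.foldl pvBestStep none with
       | none => []
       | some (k, _, c) => if c = 1 then [k] else []) := by
  rw [a_fold_eq_filter xs xs [], List.nil_append]
  by_cases hne : xs = []
  · subst hne; rfl
  · obtain ⟨k, m, c, heq, hmem, hall, hc⟩ := b_fold_spec xs hne
    rw [heq]
    show _ = if c = 1 then [k] else []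
    by_cases hc1 : c = 1
    · rw [if_pos hc1]
      have hcnt : xs.countP (fun p => decide (p.2 = m)) = 1 := by omega
      exact filter_keep_unique xs hnd k m hmem hall hcnt
    · rw [if_neg hc1]
      have hge1 : 1 ≤ xs.countP (fun p => decide (p.2 = m)) := by
        have hm : (k, m) ∈ xs.filter (fun p => decide (p.2 = m)) :=
          List.mem_filter.mpr ⟨hmem, by simp⟩
        rw [List.countP_eq_length_filter]
        exact List.length_pos_of_mem hm
      have hcnt : 2 ≤ xs.countP (fun p => decide (p.2 = m)) := by omega
      exact filter_keep_tied xs hnd m hall hcnt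

-- ===== VERDICT =====
theorem find_pareto_dominant_strategies_spec : Claim_equal_find_pareto_dominant_strategies := by
  intro l _
  exact main_eq (PySem.Dict.ofList l).items (PySem.Dict.nodup_keys_ofList l)
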